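-- pv_equiv track=rewrite | github.com/E1Adamov/bouquet_production_line | server/src/internal/tools.py | deduct_int_dicts
-- ===== SOURCE A (Python) =====
-- import copy
-- from typing import Dict, Any
--
-- def deduct_int_dicts(from_dict: Dict[Any, int], deduct_dict: Dict[Any, int]) -> Dict[Any, int]:
--     from_dict = copy.deepcopy(from_dict)
--     deduct_dict = copy.deepcopy(deduct_dict)
--
--     for key, value in deduct_dict.items():
--         if key in from_dict:
--             from_dict[key] -= deduct_dict[key]
--             if not from_dict[key]:
--                 del from_dict[key]
--
--     return from_dict
-- ===== SOURCE B (Python) =====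
-- def deduct_int_dicts(from_dict, deduct_dict):
--     # Build the result in one comprehension over from_dict; no deepcopy, no mutation.
--     return {k: v - deduct_dict.get(k, 0)
--             for k, v in from_dict.items()
--             if k not in deduct_dict or v - deduct_dict[k] != 0}
-- ===== Notes on version B (the rewrite author's own statement) =====
-- stated objective: simpler
-- what changed: Replaces deepcopy-then-mutate-while-looping-over-deduct_dict with a single dict comprehension over from_dict that subtracts deduct_dict.get(k, 0) and omits a key exactly when it is in deduct_dict and the difference is zero.
import Mathlib
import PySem

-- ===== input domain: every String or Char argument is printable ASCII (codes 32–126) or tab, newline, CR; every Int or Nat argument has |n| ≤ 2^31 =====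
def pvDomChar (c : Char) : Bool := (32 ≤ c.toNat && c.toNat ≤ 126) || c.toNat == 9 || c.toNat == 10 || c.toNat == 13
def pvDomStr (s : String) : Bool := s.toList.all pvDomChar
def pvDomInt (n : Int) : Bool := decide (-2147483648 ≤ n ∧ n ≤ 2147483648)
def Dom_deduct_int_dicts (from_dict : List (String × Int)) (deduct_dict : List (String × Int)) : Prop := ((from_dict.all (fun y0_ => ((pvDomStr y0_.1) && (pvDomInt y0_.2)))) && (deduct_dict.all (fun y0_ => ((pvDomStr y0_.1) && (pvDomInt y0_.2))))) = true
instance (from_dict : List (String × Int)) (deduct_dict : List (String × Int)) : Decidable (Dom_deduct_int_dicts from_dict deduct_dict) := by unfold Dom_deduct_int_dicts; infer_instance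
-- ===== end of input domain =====

-- B replaces A's deepcopy-and-mutate loop over deduct_dict with one dict comprehension
-- over from_dict (objective: simpler). Neither program mutates caller-visible state
-- (A mutates only its deepcopies), so return-value equivalence is the whole story.

-- ===== PORT A =====
-- A's deepcopies copy dicts of ints; in a pure setting they are the identity.
def deduct_int_dicts (from_dict : List (String × Int)) (deduct_dict : List (String × Int)) : List (String × Int) :=
  let fd := PySem.Dict.ofList from_dict
  let dd := PySem.Dict.ofList deduct_dict
  (dd.items.foldl (fun acc kv =>
      if acc.contains kv.1 then
        let acc' := acc.insert kv.1 (acc.getD kv.1 0 - dd.getD kv.1 0)  -- from_dict[key] -= deduct_dict[key]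
        if acc'.getD kv.1 0 = 0 then acc'.erase kv.1 else acc'          -- if not from_dict[key]: del from_dict[key]
      else acc) fd).items

-- ===== PORT B =====
def deduct_int_dicts_alt (from_dict : List (String × Int)) (deduct_dict : List (String × Int)) : List (String × Int) :=
  let dd := PySem.Dict.ofList deduct_dict
  (PySem.Dict.ofList from_dict).items.filterMap (fun p =>
    if !dd.contains p.1 || !(p.2 - dd.getD p.1 0 == 0)
    then some (p.1, p.2 - dd.getD p.1 0) else none)

-- ===== PRECONDITION & SPEC =====
def Spec_deduct_int_dicts (from_dict : List (String × Int)) (deduct_dict : List (String × Int)) (out : List (String × Int)) : Prop := out = deduct_int_dicts_alt from_dict deduct_dict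
instance (from_dict : List (String × Int)) (deduct_dict : List (String × Int)) (out : List (String × Int)) : Decidable (Spec_deduct_int_dicts from_dict deduct_dict out) := by unfold Spec_deduct_int_dicts; infer_instance

-- ===== CLAIM (what is proved, stated in full; the proofs are below) =====
def Claim_equal_deduct_int_dicts : Prop := ∀ (from_dict : List (String × Int)) (deduct_dict : List (String × Int)), Dom_deduct_int_dicts from_dict deduct_dict → Spec_deduct_int_dicts from_dict deduct_dict (deduct_int_dicts from_dict deduct_dict)

-- ===== LEMMAS AND PROOFS =====

-- A's loop body, with deduct_dict[key] already replaced by the iterated value kv.2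
def pvStep (acc : PySem.Dict String Int) (kv : String × Int) : PySem.Dict String Int :=
  if acc.contains kv.1 then
    let acc' := acc.insert kv.1 (acc.getD kv.1 0 - kv.2)
    if acc'.getD kv.1 0 = 0 then acc'.erase kv.1 else acc'
  else acc

-- what one step of A does to a single stored entry p, given the deduct pair (k, v)
def pvG (k : String) (v : Int) (p : String × Int) : Option (String × Int) :=
  if p.1 == k then (if p.2 - v = 0 then none else some (k, p.2 - v)) else some p

-- what the whole loop over deduct pairs dl does to a single stored entry p
def pvF (dl : List (String × Int)) (p : String × Int) : Option (String × Int) :=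
  match (PySem.Dict.mk dl).get? p.1 with
  | some d => if p.2 - d = 0 then none else some (p.1, p.2 - d)
  | none => some p

theorem pv_filterMap_if_none {α : Type} (q : α → Bool) (l : List α) :
    l.filterMap (fun x => if q x then none else some x) = l.filter (fun x => !q x) := by
  induction l with
  | nil => rfl
  | cons x xs ih =>
    by_cases h : q x <;> simp [h, ih]

theorem pv_nodup_keys_erase (d : PySem.Dict String Int) (k : String)
    (h : d.keys.Nodup) : (d.erase k).keys.Nodup := by
  have hsub : (d.erase k).keys.Sublist d.keys := by
    simpa [PySem.Dict.erase, PySem.Dict.keys] using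
      List.Sublist.map (fun p => p.1) (List.filter_sublist (l := d.items))
  exact h.sublist hsub

theorem pv_step_nodup (acc : PySem.Dict String Int) (kv : String × Int)
    (h : acc.keys.Nodup) : (pvStep acc kv).keys.Nodup := by
  simp only [pvStep]
  split_ifs with h1 _
  · exact pv_nodup_keys_erase _ _ (PySem.Dict.nodup_keys_insert _ _ _ h)
  · exact PySem.Dict.nodup_keys_insert _ _ _ h
  · exact h

theorem pv_step_items (acc : PySem.Dict String Int) (k : String) (v : Int)
    (h : acc.keys.Nodup) :
    (pvStep acc (k, v)).items = acc.items.filterMap (pvG k v) := by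
  have hval : ∀ p ∈ acc.items, (p.1 == k) = true → p.2 = acc.getD k 0 := by
    intro p hp hpk
    have hk : p.1 = k := by simpa using hpk
    have := PySem.Dict.getD_of_mem_items (d := acc) (k := p.1) (v := p.2)
      (by simpa using hp) h 0
    rw [hk] at this; omega
  unfold pvStep
  by_cases hc : acc.contains k = true
  · have hitems : (acc.insert k (acc.getD k 0 - v)).items
        = acc.items.map (fun p => if p.1 == k then (k, acc.getD k 0 - v) else p) :=
      PySem.Dict.items_insert_of_contains acc _ hc
    simp only [hc, if_true, PySem.Dict.getD_insert_self]
    by_cases hz : acc.getD k 0 - v = 0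
    · rw [if_pos hz]
      have hfilter : acc.items.filter
          ((fun p => !(p.1 == k)) ∘ fun p => if p.1 == k then (k, acc.getD k 0 - v) else p)
          = acc.items.filter (fun p => !(p.1 == k)) := by
        apply List.filter_congr
        intro p _
        by_cases hpk : p.1 = k <;> simp [hpk]
      have hmapid : (acc.items.filter (fun p => !(p.1 == k))).map
          (fun p => if p.1 == k then (k, acc.getD k 0 - v) else p)
          = acc.items.filter (fun p => !(p.1 == k)) := by
        have : ∀ p ∈ acc.items.filter (fun p => !(p.1 == k)),
            (fun p => if p.1 == k then (k, acc.getD k 0 - v) else p) p = id p := by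
          intro p hp
          have := List.of_mem_filter hp
          simp only [Bool.not_eq_true'] at this
          simp [this]
        rw [List.map_congr_left this, List.map_id]
      have hrhs : acc.items.filterMap (pvG k v)
          = acc.items.filter (fun p => !(p.1 == k)) := by
        rw [show acc.items.filterMap (pvG k v)
            = acc.items.filterMap (fun p => if (p.1 == k) then none else some p) from
          List.filterMap_congr (by
            intro p hp
            unfold pvG
            by_cases hpk : (p.1 == k) = true
            · have := hval p hp hpk
              simp [hpk, this, hz]
            · simp [hpk])]
        exact pv_filterMap_if_none _ _
      simp only [PySem.Dict.erase, hitems, List.filter_map, hfilter, hmapid, hrhs]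
    · rw [if_neg hz, hitems]
      rw [show acc.items.filterMap (pvG k v)
          = acc.items.filterMap (fun p => some (if p.1 == k then (k, acc.getD k 0 - v) else p)) from
        List.filterMap_congr (by
          intro p hp
          unfold pvG
          by_cases hpk : (p.1 == k) = true
          · have := hval p hp hpk
            simp [hpk, this, hz]
          · simp [hpk])]
      simp
  · simp only [hc, Bool.false_eq_true, if_false]
    have : ∀ p ∈ acc.items, pvG k v p = some p := by
      intro p hp
      have hpk : (p.1 == k) = false := by
        by_contra hne
        have hpk : (p.1 == k) = true := by
          cases hh : (p.1 == k) <;> simp_all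
        exact hc (by
          simp only [PySem.Dict.contains, List.any_eq_true]
          exact ⟨p, hp, hpk⟩)
      simp [pvG, hpk]
    rw [List.filterMap_congr this, List.filterMap_some]

theorem pv_fold (dl : List (String × Int)) (acc : PySem.Dict String Int)
    (hdl : (dl.map (fun p => p.1)).Nodup) (hacc : acc.keys.Nodup) :
    (dl.foldl pvStep acc).items = acc.items.filterMap (pvF dl) := by
  induction dl generalizing acc with
  | nil =>
    simp only [List.foldl_nil]
    rw [show acc.items.filterMap (pvF []) = acc.items.filterMap some from
      List.filterMap_congr (by intro p _; simp [pvF, PySem.Dict.get?])]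
    exact (List.filterMap_some).symm ▸ List.filterMap_some
  | cons hd tl ih =>
    obtain ⟨k, v⟩ := hd
    simp only [List.map_cons, List.nodup_cons] at hdl
    obtain ⟨hknot, htl⟩ := hdl
    simp only [List.foldl_cons]
    rw [ih (pvStep acc (k, v)) htl (pv_step_nodup acc (k, v) hacc)]
    rw [pv_step_items acc k v hacc, List.filterMap_filterMap]
    apply List.filterMap_congr
    intro p _
    by_cases hpk : p.1 = k
    · have hbeq : (p.1 == k) = true := by simp [hpk]
      have hbeq' : (k == p.1) = true := by simp [hpk]
      unfold pvG pvF
      simp only [hbeq, if_true, PySem.Dict.get?_mk_cons, hbeq', if_true]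
      by_cases hz : p.2 - v = 0
      · simp [hz]
      · have hnone : (PySem.Dict.mk tl).get? k = none := by
          rw [PySem.Dict.get?_eq_none_iff_not_mem_keys, PySem.Dict.keys_mk]
          exact hknot
        simp [hz, Option.bind, hnone, hpk]
    · have hbeq : (p.1 == k) = false := by simp [hpk]
      have hbeq' : (k == p.1) = false := by
        simp only [beq_eq_false_iff_ne, ne_eq]
        exact fun h => hpk h.symm
      unfold pvG pvF
      rw [PySem.Dict.get?_mk_cons]
      simp [hbeq, hbeq']

-- ===== VERDICT (by name: the statement is the Claim_ definition above) =====
theorem deduct_int_dicts_spec : Claim_equal_deduct_int_dicts := by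
  intro from_dict deduct_dict _
  simp only [Spec_deduct_int_dicts, deduct_int_dicts, deduct_int_dicts_alt]
  set fd := PySem.Dict.ofList from_dict with hfd
  set dd := PySem.Dict.ofList deduct_dict with hdd
  have hcongr : dd.items.foldl (fun acc kv =>
      if acc.contains kv.1 then
        let acc' := acc.insert kv.1 (acc.getD kv.1 0 - dd.getD kv.1 0)
        if acc'.getD kv.1 0 = 0 then acc'.erase kv.1 else acc'
      else acc) fd = dd.items.foldl pvStep fd := by
    apply PySem.List.foldl_congr_mem
    intro acc kv hkv
    have hv : dd.getD kv.1 0 = kv.2 :=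
      PySem.Dict.getD_of_mem_items (d := dd) (k := kv.1) (v := kv.2)
        (by simpa using hkv) (hdd ▸ PySem.Dict.nodup_keys_ofList deduct_dict) 0
    simp [pvStep, hv]
  rw [hcongr]
  have hnodupdd : (dd.items.map (fun p => p.1)).Nodup := by
    have := hdd ▸ PySem.Dict.nodup_keys_ofList deduct_dict
    simpa [PySem.Dict.keys] using this
  rw [pv_fold dd.items fd hnodupdd (hfd ▸ PySem.Dict.nodup_keys_ofList from_dict)]
  apply List.filterMap_congr
  intro p _
  have hmk : PySem.Dict.mk dd.items = dd := rfl
  unfold pvF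
  rw [hmk]
  cases hg : dd.get? p.1 with
  | none =>
    have hcon : dd.contains p.1 = false := by
      rw [PySem.Dict.contains_eq_isSome_get?, hg]; rfl
    have hgd : dd.getD p.1 0 = 0 := by
      rw [PySem.Dict.getD_eq_get?_getD, hg]; rfl
    simp [hcon, hgd]
  | some d =>
    have hcon : dd.contains p.1 = true := by
      rw [PySem.Dict.contains_eq_isSome_get?, hg]; rfl
    have hgd : dd.getD p.1 0 = d := by
      rw [PySem.Dict.getD_eq_get?_getD, hg]; rfl
    by_cases hz : p.2 - d = 0
    · simp [hcon, hgd, hz]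
    · simp [hcon, hgd, hz]
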